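-- pv_equiv track=rewrite | github.com/rashidlasker/artificial-intelligence | AI2/EdgeDetector.py | createEdgeMatrix
-- ===== SOURCE A (Python) =====
-- from copy import deepcopy
--
-- def createEdgeMatrix(width, height, oldMatrix):
--     newMatrix = deepcopy(oldMatrix)
--     for r in range(1, height-1):
--         for c in range(1, width-1):
--             # -1  0 1
--             # -2  0 2
--             # -1  0 1
--             valueC = abs(oldMatrix[r - 1][c - 1]*-1 + oldMatrix[r - 1][c]*0 + oldMatrix[r - 1][c + 1]*1 + oldMatrix[r][c - 1]*-2 + oldMatrix[r][c]*0 + oldMatrix[r][c + 1]*2 + oldMatrix[r + 1][c - 1]*-1 + oldMatrix[r + 1][c]*0 + oldMatrix[r + 1][c + 1]*1)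
--             #  1  2  1
--             #  0  0  0
--             # -1 -2 -1
--             valueR = abs(oldMatrix[r - 1][c - 1]*1 + oldMatrix[r - 1][c]*2 + oldMatrix[r - 1][c + 1]*1 + oldMatrix[r][c - 1]*0 + oldMatrix[r][c]*0 + oldMatrix[r][c + 1]*0 + oldMatrix[r + 1][c - 1]*-1 + oldMatrix[r + 1][c]*-2 + oldMatrix[r + 1][c + 1]*-1)
--             if valueC + valueR > 100:
--                newMatrix[r][c] = -1
--     return newMatrix
-- ===== SOURCE B (Python) =====
-- def createEdgeMatrix(width, height, oldMatrix):
--     newMatrix = [row[:] for row in oldMatrix]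
--     if width > 2 and height > 2:
--         for r in range(1, height - 1):
--             # separable Sobel: vertical smoothing / vertical difference buffers for this row
--             v = [oldMatrix[r - 1][c] + 2 * oldMatrix[r][c] + oldMatrix[r + 1][c] for c in range(width)]
--             h = [oldMatrix[r - 1][c] - oldMatrix[r + 1][c] for c in range(width)]
--             for c in range(1, width - 1):
--                 gx = v[c + 1] - v[c - 1]
--                 gy = h[c - 1] + 2 * h[c] + h[c + 1]
--                 if abs(gx) + abs(gy) > 100:
--                     newMatrix[r][c] = -1
--     return newMatrix
-- ===== Notes on version B (the rewrite author's own statement) =====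
-- stated objective: alternative
-- what changed: Replaces the direct nine-neighbor Sobel stencil by a separable two-pass scheme: per row it first builds vertical smoothing/difference buffers over all columns, then takes adjacent differences of those buffers to get Gx and Gy; an interior-pixel guard skips degenerate sizes.
import Mathlib
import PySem

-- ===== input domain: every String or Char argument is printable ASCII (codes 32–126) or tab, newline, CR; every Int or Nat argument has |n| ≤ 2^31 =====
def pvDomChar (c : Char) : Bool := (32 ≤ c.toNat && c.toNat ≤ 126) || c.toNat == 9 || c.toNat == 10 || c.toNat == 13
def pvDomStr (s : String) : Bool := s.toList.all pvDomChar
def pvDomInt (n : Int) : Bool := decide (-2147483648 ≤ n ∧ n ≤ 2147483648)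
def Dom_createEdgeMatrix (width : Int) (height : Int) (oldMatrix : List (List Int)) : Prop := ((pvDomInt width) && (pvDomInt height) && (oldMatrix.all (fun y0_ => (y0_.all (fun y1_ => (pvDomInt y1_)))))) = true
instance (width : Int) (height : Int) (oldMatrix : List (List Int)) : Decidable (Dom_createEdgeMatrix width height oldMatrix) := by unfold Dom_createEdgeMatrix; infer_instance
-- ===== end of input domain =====

-- B recomputes the Sobel stencil by separable per-row smoothing/difference buffers (alternative decomposition, same cost).

-- ===== PORT A =====
-- oldMatrix[r][c]: under Pre_ every read is in range, so the total default form is exact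
def pvGet2 (m : List (List Int)) (r c : Int) : Int :=
  PySem.List.pyGetD (PySem.List.pyGetD m r []) c 0

-- newMatrix[r][c] = -1 (indices nonnegative and in range under Pre_)
def pvSet2 (m : List (List Int)) (r c : Int) (v : Int) : List (List Int) :=
  PySem.List.pySetD m r (PySem.List.pySetD (PySem.List.pyGetD m r []) c v)

def createEdgeMatrix (width : Int) (height : Int) (oldMatrix : List (List Int)) : List (List Int) :=
  (PySem.List.pyRange 1 (height - 1) 1).foldl (fun nm r =>
    (PySem.List.pyRange 1 (width - 1) 1).foldl (fun nm c =>
      let valueC := |pvGet2 oldMatrix (r-1) (c-1) * (-1) + pvGet2 oldMatrix (r-1) c * 0 + pvGet2 oldMatrix (r-1) (c+1) * 1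
                     + pvGet2 oldMatrix r (c-1) * (-2) + pvGet2 oldMatrix r c * 0 + pvGet2 oldMatrix r (c+1) * 2
                     + pvGet2 oldMatrix (r+1) (c-1) * (-1) + pvGet2 oldMatrix (r+1) c * 0 + pvGet2 oldMatrix (r+1) (c+1) * 1|
      let valueR := |pvGet2 oldMatrix (r-1) (c-1) * 1 + pvGet2 oldMatrix (r-1) c * 2 + pvGet2 oldMatrix (r-1) (c+1) * 1
                     + pvGet2 oldMatrix r (c-1) * 0 + pvGet2 oldMatrix r c * 0 + pvGet2 oldMatrix r (c+1) * 0
                     + pvGet2 oldMatrix (r+1) (c-1) * (-1) + pvGet2 oldMatrix (r+1) c * (-2) + pvGet2 oldMatrix (r+1) (c+1) * (-1)|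
      if valueC + valueR > 100 then pvSet2 nm r c (-1) else nm) nm) oldMatrix

-- ===== PORT B =====
def createEdgeMatrix_alt (width : Int) (height : Int) (oldMatrix : List (List Int)) : List (List Int) :=
  if 2 < width ∧ 2 < height then
    (PySem.List.pyRange 1 (height - 1) 1).foldl (fun nm r =>
      let v := (PySem.List.pyRange 0 width 1).map (fun c =>
        pvGet2 oldMatrix (r-1) c + 2 * pvGet2 oldMatrix r c + pvGet2 oldMatrix (r+1) c)
      let h := (PySem.List.pyRange 0 width 1).map (fun c =>
        pvGet2 oldMatrix (r-1) c - pvGet2 oldMatrix (r+1) c)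
      (PySem.List.pyRange 1 (width - 1) 1).foldl (fun nm c =>
        let gx := PySem.List.pyGetD v (c+1) 0 - PySem.List.pyGetD v (c-1) 0
        let gy := PySem.List.pyGetD h (c-1) 0 + 2 * PySem.List.pyGetD h c 0 + PySem.List.pyGetD h (c+1) 0
        if |gx| + |gy| > 100 then pvSet2 nm r c (-1) else nm) nm) oldMatrix
  else oldMatrix

-- ===== PRECONDITION & SPEC =====
-- Pre_ excludes exactly the inputs where Python A raises IndexError: a non-empty interior
-- (width > 2 and height > 2) whose accessed rows 0..height-1 are missing or shorter than width.
def Pre_createEdgeMatrix (width : Int) (height : Int) (oldMatrix : List (List Int)) : Prop :=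
  height ≤ 2 ∨ width ≤ 2 ∨
    (height ≤ oldMatrix.length ∧ ∀ row ∈ oldMatrix.take height.toNat, width ≤ row.length)
instance (width : Int) (height : Int) (oldMatrix : List (List Int)) : Decidable (Pre_createEdgeMatrix width height oldMatrix) := by unfold Pre_createEdgeMatrix; infer_instance

def pvWitness_createEdgeMatrix : Int × Int × List (List Int) :=
  (3, 3, [[0, 0, 0], [0, 200, 0], [90, 0, 0]])

def Spec_createEdgeMatrix (width : Int) (height : Int) (oldMatrix : List (List Int)) (out : List (List Int)) : Prop := out = createEdgeMatrix_alt width height oldMatrix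
instance (width : Int) (height : Int) (oldMatrix : List (List Int)) (out : List (List Int)) : Decidable (Spec_createEdgeMatrix width height oldMatrix out) := by unfold Spec_createEdgeMatrix; infer_instance

-- ===== CLAIM (what is proved, stated in full; the proofs are below) =====
def Claim_equal_createEdgeMatrix : Prop := ∀ (width : Int) (height : Int) (oldMatrix : List (List Int)), Dom_createEdgeMatrix width height oldMatrix → Pre_createEdgeMatrix width height oldMatrix → Spec_createEdgeMatrix width height oldMatrix (createEdgeMatrix width height oldMatrix)

-- ===== LEMMAS AND PROOFS =====

theorem pvFoldlId {α β : Type} (l : List β) (init : α) :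
    l.foldl (fun a _ => a) init = init := by
  induction l generalizing init with
  | nil => rfl
  | cons x xs ih => exact ih init

-- the two ports agree on every input (Pre_ is only needed for faithfulness to Python)
theorem pvPortsEq (width height : Int) (oldMatrix : List (List Int)) :
    createEdgeMatrix width height oldMatrix = createEdgeMatrix_alt width height oldMatrix := by
  unfold createEdgeMatrix createEdgeMatrix_alt
  by_cases hw : 2 < width ∧ 2 < height
  · rw [if_pos hw]
    apply PySem.List.foldl_congr_mem
    intro nm r _
    apply PySem.List.foldl_congr_mem
    intro nm' c hc
    rw [PySem.List.mem_pyRange_one] at hc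
    simp only []
    rw [PySem.List.pyGetD_map_pyRange_of_nonneg _ width (c+1) 0 (by omega) (by omega),
        PySem.List.pyGetD_map_pyRange_of_nonneg _ width (c-1) 0 (by omega) (by omega),
        PySem.List.pyGetD_map_pyRange_of_nonneg _ width (c-1) 0 (by omega) (by omega),
        PySem.List.pyGetD_map_pyRange_of_nonneg _ width c 0 (by omega) (by omega),
        PySem.List.pyGetD_map_pyRange_of_nonneg _ width (c+1) 0 (by omega) (by omega)]
    have e1 : pvGet2 oldMatrix (r-1) (c-1) * (-1) + pvGet2 oldMatrix (r-1) c * 0 + pvGet2 oldMatrix (r-1) (c+1) * 1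
                     + pvGet2 oldMatrix r (c-1) * (-2) + pvGet2 oldMatrix r c * 0 + pvGet2 oldMatrix r (c+1) * 2
                     + pvGet2 oldMatrix (r+1) (c-1) * (-1) + pvGet2 oldMatrix (r+1) c * 0 + pvGet2 oldMatrix (r+1) (c+1) * 1
        = (pvGet2 oldMatrix (r-1) (c+1) + 2 * pvGet2 oldMatrix r (c+1) + pvGet2 oldMatrix (r+1) (c+1))
          - (pvGet2 oldMatrix (r-1) (c-1) + 2 * pvGet2 oldMatrix r (c-1) + pvGet2 oldMatrix (r+1) (c-1)) := by ring
    have e2 : pvGet2 oldMatrix (r-1) (c-1) * 1 + pvGet2 oldMatrix (r-1) c * 2 + pvGet2 oldMatrix (r-1) (c+1) * 1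
                     + pvGet2 oldMatrix r (c-1) * 0 + pvGet2 oldMatrix r c * 0 + pvGet2 oldMatrix r (c+1) * 0
                     + pvGet2 oldMatrix (r+1) (c-1) * (-1) + pvGet2 oldMatrix (r+1) c * (-2) + pvGet2 oldMatrix (r+1) (c+1) * (-1)
        = (pvGet2 oldMatrix (r-1) (c-1) - pvGet2 oldMatrix (r+1) (c-1))
          + 2 * (pvGet2 oldMatrix (r-1) c - pvGet2 oldMatrix (r+1) c)
          + (pvGet2 oldMatrix (r-1) (c+1) - pvGet2 oldMatrix (r+1) (c+1)) := by ring
    rw [e1, e2]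
  · rw [if_neg hw]
    rcases not_and_or.mp hw with h | h
    · -- width ≤ 2: every inner loop is empty, the outer fold keeps its accumulator
      have hnil : PySem.List.pyRange 1 (width - 1) 1 = [] :=
        PySem.List.pyRange_one_eq_nil (by omega)
      calc (PySem.List.pyRange 1 (height - 1) 1).foldl _ oldMatrix
          = (PySem.List.pyRange 1 (height - 1) 1).foldl (fun nm _ => nm) oldMatrix := by
            apply PySem.List.foldl_congr_mem; intro nm r _; rw [hnil]; rfl
        _ = oldMatrix := pvFoldlId _ _
    · -- height ≤ 2: the outer range is empty
      rw [show PySem.List.pyRange 1 (height - 1) 1 = [] from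
            PySem.List.pyRange_one_eq_nil (by omega)]
      rfl

-- ===== VERDICT (by name: the statement is the Claim_ definition above) =====
theorem createEdgeMatrix_spec : Claim_equal_createEdgeMatrix := by
  intro width height oldMatrix _ _
  unfold Spec_createEdgeMatrix
  exact pvPortsEq width height oldMatrix
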